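-- pv_equiv track=rewrite | github.com/Modern-Democracy/mdopendata | scripts/normalize-land-use.py | classify_zone
-- ===== SOURCE A (Python) =====
-- def classify_zone(permitted_uses, kind):
--     if kind == "planned_development":
--         return "planned"
--     categories = {
--         str(item.get("source_category_raw", "")).lower()
--         for item in permitted_uses
--         if item.get("source_category_raw")
--     }
--     names = {
--         str(item.get("use_type", "")).lower()
--         for item in permitted_uses
--         if item.get("use_type")
--     }
--     text = " ".join(sorted(categories | names))
--     has_residential = "residential" in text or "dwelling" in text
--     has_commercial = "commercial" in text or "business" in text or "office" in text
--     if has_residential and has_commercial: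
--         return "mixed_with_residential"
--     if has_residential:
--         return "primarily_residential"
--     if permitted_uses:
--         return "nonresidential"
--     return "unknown"
-- ===== SOURCE B (Python) =====
-- def classify_zone(permitted_uses, kind):
--     if kind == "planned_development":
--         return "planned"
--     has_residential = False
--     has_commercial = False
--     for item in permitted_uses:
--         for field in ("source_category_raw", "use_type"):
--             value = item.get(field)
--             if value:
--                 text = str(value).lower()
--                 if "residential" in text or "dwelling" in text:
--                     has_residential = True
--                 if "commercial" in text or "business" in text or "office" in text:
--                     has_commercial = True
--     if has_residential and has_commercial:
--         return "mixed_with_residential"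
--     if has_residential:
--         return "primarily_residential"
--     if permitted_uses:
--         return "nonresidential"
--     return "unknown"
-- ===== Notes on version B (the rewrite author's own statement) =====
-- stated objective: simpler
-- what changed: Replaces the two set comprehensions, set union, sort and joined-text substring search with a single pass over the records that ORs keyword hits per field value into two boolean flags.
import Mathlib
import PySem

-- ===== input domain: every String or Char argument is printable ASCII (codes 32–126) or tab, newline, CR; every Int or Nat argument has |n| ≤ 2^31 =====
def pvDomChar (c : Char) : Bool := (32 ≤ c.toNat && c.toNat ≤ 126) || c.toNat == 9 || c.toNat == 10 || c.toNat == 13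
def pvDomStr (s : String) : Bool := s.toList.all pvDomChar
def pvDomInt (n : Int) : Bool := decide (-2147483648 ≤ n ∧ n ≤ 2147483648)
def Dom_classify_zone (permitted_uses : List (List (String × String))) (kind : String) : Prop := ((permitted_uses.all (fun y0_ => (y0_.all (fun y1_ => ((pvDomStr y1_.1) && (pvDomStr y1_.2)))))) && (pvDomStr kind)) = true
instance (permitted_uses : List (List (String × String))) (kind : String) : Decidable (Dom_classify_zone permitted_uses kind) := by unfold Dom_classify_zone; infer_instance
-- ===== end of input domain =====

-- B replaces A's set comprehensions, set union, sort and joined-text substring scan by a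
-- single pass over the records that ORs keyword hits into two boolean flags (objective: simpler).

-- shared primitive: Python dict.get(k) on the association list (first match), '' when absent
def pvGet (item : List (String × String)) (k : String) : String :=
  (((item.find? (fun p => p.1 == k)).map (fun p => p.2)).getD "")

-- ===== PORT A =====
def classify_zone (permitted_uses : List (List (String × String))) (kind : String) : String :=
  if kind == "planned_development" then "planned"
  else
    let categories := PySem.Set.ofList
      ((permitted_uses.filter (fun item => !(pvGet item "source_category_raw" == ""))).map
        (fun item => PySem.Str.lower (pvGet item "source_category_raw")))
    let names := PySem.Set.ofList
      ((permitted_uses.filter (fun item => !(pvGet item "use_type" == ""))).map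
        (fun item => PySem.Str.lower (pvGet item "use_type")))
    let text := PySem.Str.join " " (PySem.List.sorted (PySem.Set.union categories names) (fun x => x) false)
    let has_residential := PySem.Str.isIn "residential" text || PySem.Str.isIn "dwelling" text
    let has_commercial := PySem.Str.isIn "commercial" text || PySem.Str.isIn "business" text || PySem.Str.isIn "office" text
    if has_residential && has_commercial then "mixed_with_residential"
    else if has_residential then "primarily_residential"
    else if !(permitted_uses == []) then "nonresidential"
    else "unknown"

-- ===== PORT B =====
def classify_zone_alt (permitted_uses : List (List (String × String))) (kind : String) : String :=
  if kind == "planned_development" then "planned"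
  else
    let st := permitted_uses.foldl (fun st item =>
      (["source_category_raw", "use_type"]).foldl (fun st field =>
        let value := pvGet item field
        if value == "" then st
        else
          let text := PySem.Str.lower value
          (st.1 || (PySem.Str.isIn "residential" text || PySem.Str.isIn "dwelling" text),
           st.2 || (PySem.Str.isIn "commercial" text || PySem.Str.isIn "business" text || PySem.Str.isIn "office" text))) st)
      (false, false)
    if st.1 && st.2 then "mixed_with_residential"
    else if st.1 then "primarily_residential"
    else if !(permitted_uses == []) then "nonresidential"
    else "unknown"

-- ===== PRECONDITION & SPEC =====
def Spec_classify_zone (permitted_uses : List (List (String × String))) (kind : String) (out : String) : Prop := out = classify_zone_alt permitted_uses kind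
instance (permitted_uses : List (List (String × String))) (kind : String) (out : String) : Decidable (Spec_classify_zone permitted_uses kind out) := by unfold Spec_classify_zone; infer_instance

-- ===== CLAIM (what is proved, stated in full; the proofs are below) =====
def Claim_equal_classify_zone : Prop := ∀ (permitted_uses : List (List (String × String))) (kind : String), Dom_classify_zone permitted_uses kind → Spec_classify_zone permitted_uses kind (classify_zone permitted_uses kind)

-- ===== LEMMAS AND PROOFS =====

-- an infix containing no 'c' of a list split by one 'c' lies wholly on one side
theorem pv_infix_append_cons {α : Type} (c : α) (kw a b : List α) (hc : c ∉ kw) :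
    kw <:+: (a ++ c :: b) ↔ kw <:+: a ∨ kw <:+: b := by
  constructor
  · rintro ⟨s, t, hst⟩
    by_cases h1 : s.length + kw.length ≤ a.length
    · left
      refine ⟨s, t.take (a.length - (s.length + kw.length)), ?_⟩
      have h := congrArg (List.take a.length) hst
      have hsk : (s ++ kw).length ≤ a.length := by simp; omega
      rw [List.take_append, List.take_of_length_le hsk, List.length_append,
        List.take_append, List.take_of_length_le (le_refl _), Nat.sub_self,
        List.take_zero, List.append_nil] at h
      exact h
    · by_cases h2 : a.length + 1 ≤ s.length
      · right
        refine ⟨s.drop (a.length + 1), t, ?_⟩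
        have h := congrArg (List.drop (a.length + 1)) hst
        rw [List.drop_append, List.drop_append, List.length_append,
          Nat.sub_eq_zero_of_le h2, List.drop_zero,
          Nat.sub_eq_zero_of_le (by omega : a.length + 1 ≤ s.length + kw.length),
          List.drop_zero] at h
        simpa [List.drop_eq_nil_of_le, Nat.add_sub_cancel_left] using h
      · exfalso
        have hs : s.length ≤ a.length := by omega
        have hk : a.length - s.length < kw.length := by omega
        have hal : a.length < (a ++ c :: b).length := by simp
        have hsk : a.length < (s ++ kw).length := by simp; omega
        have hal' : a.length < ((s ++ kw) ++ t).length := by simp at hsk ⊢; omega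
        have hL : ((s ++ kw) ++ t)[a.length]'hal' = kw[a.length - s.length]'hk := by
          rw [List.getElem_append_left hsk]
          rw [List.getElem_append_right hs]
        have hR : (a ++ c :: b)[a.length]'hal = c := by
          rw [List.getElem_append_right (le_refl _)]
          simp
        have heq : kw[a.length - s.length]'hk = c := by
          rw [← hL, ← hR]
          congr 1
        exact hc (heq ▸ List.getElem_mem hk)
  · rintro (h | h)
    · exact h.trans ((List.prefix_append a (c :: b)).isInfix)
    · exact h.trans (((List.suffix_cons c b).trans (List.suffix_append a (c :: b))).isInfix)

-- a space-free nonempty pattern is in ' '.join(parts) iff it is in some part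
theorem pv_infix_join_space (kw : List Char) (hne : kw ≠ []) (hc : ' ' ∉ kw)
    (parts : List (List Char)) :
    kw <:+: PySem.Chars.join [' '] parts ↔ ∃ p ∈ parts, kw <:+: p := by
  induction parts with
  | nil => simp [PySem.Chars.join_nil, hne]
  | cons p rest ih =>
    cases rest with
    | nil => simp [PySem.Chars.join_singleton]
    | cons q r =>
      rw [PySem.Chars.join_cons_cons, List.append_assoc, List.singleton_append,
        pv_infix_append_cons ' ' kw p _ hc, ih]
      simp

-- a keyword is in A's joined text iff some record has a field value containing it
theorem pv_isIn_text (kw : String) (hne : kw.toList ≠ []) (hc : ' ' ∉ kw.toList)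
    (uses : List (List (String × String))) :
    PySem.Str.isIn kw (PySem.Str.join " " (PySem.List.sorted (PySem.Set.union
      (PySem.Set.ofList ((uses.filter (fun item => !(pvGet item "source_category_raw" == ""))).map
        (fun item => PySem.Str.lower (pvGet item "source_category_raw"))))
      (PySem.Set.ofList ((uses.filter (fun item => !(pvGet item "use_type" == ""))).map
        (fun item => PySem.Str.lower (pvGet item "use_type"))))) (fun x => x) false))
    = uses.any (fun item => (["source_category_raw", "use_type"]).any
        (fun f => !(pvGet item f == "") && PySem.Str.isIn kw (PySem.Str.lower (pvGet item f)))) := by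
  rw [Bool.eq_iff_iff, PySem.Str.isIn_iff_infix, PySem.Str.toList_join,
    (by decide : (" " : String).toList = [' ']), pv_infix_join_space kw.toList hne hc]
  simp only [List.mem_map, PySem.List.mem_sorted, PySem.Set.mem_union, PySem.Set.mem_ofList,
    List.mem_filter, List.any_eq_true, List.any_cons, List.any_nil, Bool.or_eq_true,
    Bool.and_eq_true, Bool.not_eq_true', beq_eq_false_iff_ne, ne_eq,
    PySem.Str.isIn_iff_infix, Bool.or_false]
  constructor
  · rintro ⟨p, ⟨s, (⟨item, ⟨hmem, hgn⟩, rfl⟩ | ⟨item, ⟨hmem, hgn⟩, rfl⟩), rfl⟩, hin⟩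
    · exact ⟨item, hmem, Or.inl ⟨hgn, hin⟩⟩
    · exact ⟨item, hmem, Or.inr ⟨hgn, hin⟩⟩
  · rintro ⟨item, hmem, (⟨hgn, hin⟩ | ⟨hgn, hin⟩)⟩
    · exact ⟨_, ⟨_, Or.inl ⟨item, ⟨hmem, hgn⟩, rfl⟩, rfl⟩, hin⟩
    · exact ⟨_, ⟨_, Or.inr ⟨item, ⟨hmem, hgn⟩, rfl⟩, rfl⟩, hin⟩

-- per-record residential / commercial hits (B's inner loop, flattened)
def pvItemR (item : List (String × String)) : Bool :=
  (["source_category_raw", "use_type"]).any (fun f => !(pvGet item f == "") &&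
    (PySem.Str.isIn "residential" (PySem.Str.lower (pvGet item f)) ||
     PySem.Str.isIn "dwelling" (PySem.Str.lower (pvGet item f))))

def pvItemC (item : List (String × String)) : Bool :=
  (["source_category_raw", "use_type"]).any (fun f => !(pvGet item f == "") &&
    (PySem.Str.isIn "commercial" (PySem.Str.lower (pvGet item f)) ||
     PySem.Str.isIn "business" (PySem.Str.lower (pvGet item f)) ||
     PySem.Str.isIn "office" (PySem.Str.lower (pvGet item f))))

-- B's inner two-field loop sets exactly the per-record hits
theorem pv_inner_step (item : List (String × String)) (st : Bool × Bool) :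
    ((["source_category_raw", "use_type"]).foldl (fun st field =>
        let value := pvGet item field
        if value == "" then st
        else
          let text := PySem.Str.lower value
          (st.1 || (PySem.Str.isIn "residential" text || PySem.Str.isIn "dwelling" text),
           st.2 || (PySem.Str.isIn "commercial" text || PySem.Str.isIn "business" text || PySem.Str.isIn "office" text))) st)
    = (st.1 || pvItemR item, st.2 || pvItemC item) := by
  simp only [List.foldl_cons, List.foldl_nil, pvItemR, pvItemC, List.any_cons, List.any_nil]
  split_ifs with h1 h2 h2 <;>
    simp [h1, h2, Bool.or_assoc]

-- B's outer loop computes the two any-flags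
theorem pv_fold (uses : List (List (String × String))) (st : Bool × Bool) :
    (uses.foldl (fun st item =>
      (["source_category_raw", "use_type"]).foldl (fun st field =>
        let value := pvGet item field
        if value == "" then st
        else
          let text := PySem.Str.lower value
          (st.1 || (PySem.Str.isIn "residential" text || PySem.Str.isIn "dwelling" text),
           st.2 || (PySem.Str.isIn "commercial" text || PySem.Str.isIn "business" text || PySem.Str.isIn "office" text))) st) st)
    = (st.1 || uses.any pvItemR, st.2 || uses.any pvItemC) := by
  induction uses generalizing st with
  | nil => simp
  | cons item rest ih =>
    rw [List.foldl_cons, pv_inner_step, ih]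
    simp [List.any_cons, Bool.or_assoc]

-- any distributes over a pointwise || of predicates
theorem pv_any_or {α : Type} (l : List α) (f g : α → Bool) :
    (l.any fun i => f i || g i) = (l.any f || l.any g) := by
  induction l with
  | nil => simp
  | cons x t ih =>
    simp only [List.any_cons, ih]
    cases f x <;> cases g x <;> simp [Bool.or_comm]

-- ===== VERDICT (by name: the statement is the Claim_ definition above) =====
theorem classify_zone_spec : Claim_equal_classify_zone := by
  intro uses kind _
  unfold Spec_classify_zone classify_zone classify_zone_alt
  by_cases hk : (kind == "planned_development") = true
  · simp [hk]
  · simp only [hk, if_false, Bool.false_eq_true]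
    rw [pv_fold,
      pv_isIn_text "residential" (by decide) (by decide),
      pv_isIn_text "dwelling" (by decide) (by decide),
      pv_isIn_text "commercial" (by decide) (by decide),
      pv_isIn_text "business" (by decide) (by decide),
      pv_isIn_text "office" (by decide) (by decide)]
    have hR : uses.any pvItemR =
        (uses.any (fun item => (["source_category_raw", "use_type"]).any
          (fun f => !(pvGet item f == "") && PySem.Str.isIn "residential" (PySem.Str.lower (pvGet item f)))) ||
         uses.any (fun item => (["source_category_raw", "use_type"]).any
          (fun f => !(pvGet item f == "") && PySem.Str.isIn "dwelling" (PySem.Str.lower (pvGet item f))))) := by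
      rw [← pv_any_or]
      apply List.any_congr rfl
      intro item
      simp only [pvItemR, List.any_cons, List.any_nil, Bool.or_false]
      cases h1 : (pvGet item "source_category_raw" == "") <;>
        cases h2 : (pvGet item "use_type" == "") <;>
        cases PySem.Str.isIn "residential" (PySem.Str.lower (pvGet item "source_category_raw")) <;>
        cases PySem.Str.isIn "dwelling" (PySem.Str.lower (pvGet item "source_category_raw")) <;>
        cases PySem.Str.isIn "residential" (PySem.Str.lower (pvGet item "use_type")) <;>
        cases PySem.Str.isIn "dwelling" (PySem.Str.lower (pvGet item "use_type")) <;> rfl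
    have hC : uses.any pvItemC =
        ((uses.any (fun item => (["source_category_raw", "use_type"]).any
          (fun f => !(pvGet item f == "") && PySem.Str.isIn "commercial" (PySem.Str.lower (pvGet item f)))) ||
          uses.any (fun item => (["source_category_raw", "use_type"]).any
          (fun f => !(pvGet item f == "") && PySem.Str.isIn "business" (PySem.Str.lower (pvGet item f))))) ||
         uses.any (fun item => (["source_category_raw", "use_type"]).any
          (fun f => !(pvGet item f == "") && PySem.Str.isIn "office" (PySem.Str.lower (pvGet item f))))) := by
      rw [← pv_any_or, ← pv_any_or]
      apply List.any_congr rfl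
      intro item
      simp only [pvItemC, List.any_cons, List.any_nil, Bool.or_false]
      cases h1 : (pvGet item "source_category_raw" == "") <;>
        cases h2 : (pvGet item "use_type" == "") <;>
        cases PySem.Str.isIn "commercial" (PySem.Str.lower (pvGet item "source_category_raw")) <;>
        cases PySem.Str.isIn "business" (PySem.Str.lower (pvGet item "source_category_raw")) <;>
        cases PySem.Str.isIn "office" (PySem.Str.lower (pvGet item "source_category_raw")) <;>
        cases PySem.Str.isIn "commercial" (PySem.Str.lower (pvGet item "use_type")) <;>
        cases PySem.Str.isIn "business" (PySem.Str.lower (pvGet item "use_type")) <;>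
        cases PySem.Str.isIn "office" (PySem.Str.lower (pvGet item "use_type")) <;> rfl
    rw [hR, hC]
    simp
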